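-- pv_equiv track=rewrite | github.com/VijayIyer/Minimax-Chess | Board.py | generate_diagonals
-- ===== SOURCE A (Python) =====
-- def generate_diagonals(board_dim):
--     rows, cols = board_dim[0], board_dim[1]
--     diagonals = []
--     for col in range(cols):
--         init_row = -1
--         init_col = col - 1
--         diagonal_set = set()
--         while 0 <= init_row + 1 < board_dim[0] and 0 <= init_col + 1 < board_dim[1]:
--             diagonal_set.add((init_row + 1, init_col + 1))
--             init_row += 1
--             init_col += 1
--         if len(diagonal_set) > 0:
--             diagonals.append(diagonal_set)
--     for row in range(rows):
--         init_row = row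
--         init_col = -1
--         diagonal_set = set()
--         while 0 <= init_row + 1 < board_dim[0] and 0 <= init_col + 1 < board_dim[1]:
--             diagonal_set.add((init_row + 1, init_col + 1))
--             init_row += 1
--             init_col += 1
--         if len(diagonal_set) > 0:
--             diagonals.append(diagonal_set)
--     for row in range(rows):
--         init_row = row
--         init_col = board_dim[1]
--         diagonal_set = set()
--         while 0 <= init_row + 1 < board_dim[0] and 0 <= init_col - 1 < board_dim[1]:
--             diagonal_set.add((init_row + 1, init_col - 1))
--             init_row += 1
--             init_col -= 1
--         if len(diagonal_set) > 0:
--             diagonals.append(diagonal_set)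
--     for col in range(cols, 0, -1):
--         init_row = -1
--         init_col = col
--         diagonal_set = set()
--         while 0 <= init_row + 1 < board_dim[0] and 0 <= init_col - 1 < board_dim[1]:
--             diagonal_set.add((init_row + 1, init_col - 1))
--             init_row += 1
--             init_col -= 1
--         if len(diagonal_set) > 0:
--             diagonals.append(diagonal_set)
--
--     return diagonals
-- ===== SOURCE B (Python) =====
-- def generate_diagonals(board_dim):
--     rows, cols = board_dim[0], board_dim[1]
--     cells = [(r, c) for r in range(rows) for c in range(cols)]
--     down_right = {}
--     for r, c in cells:
--         down_right.setdefault(r - c, set()).add((r, c))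
--     down_left = {}
--     for r, c in cells:
--         down_left.setdefault(r + c, set()).add((r, c))
--     diagonals = []
--     for col in range(cols):
--         s = down_right.get(-col, set())
--         if len(s) > 0:
--             diagonals.append(s)
--     for row in range(rows):
--         s = down_right.get(row + 1, set())
--         if len(s) > 0:
--             diagonals.append(s)
--     for row in range(rows):
--         s = down_left.get(row + cols, set())
--         if len(s) > 0:
--             diagonals.append(s)
--     for col in range(cols, 0, -1):
--         s = down_left.get(col - 1, set())
--         if len(s) > 0:
--             diagonals.append(s)
--     return diagonals
-- ===== Notes on version B (the rewrite author's own statement) =====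
-- stated objective: alternative
-- what changed: A walks every diagonal cell-by-cell with four families of while-loops; B makes one pass over the board grouping cells into two diagonal-index dictionaries (keys r-c and r+c) and then emits the stored sets in A's four-phase order.
import Mathlib
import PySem

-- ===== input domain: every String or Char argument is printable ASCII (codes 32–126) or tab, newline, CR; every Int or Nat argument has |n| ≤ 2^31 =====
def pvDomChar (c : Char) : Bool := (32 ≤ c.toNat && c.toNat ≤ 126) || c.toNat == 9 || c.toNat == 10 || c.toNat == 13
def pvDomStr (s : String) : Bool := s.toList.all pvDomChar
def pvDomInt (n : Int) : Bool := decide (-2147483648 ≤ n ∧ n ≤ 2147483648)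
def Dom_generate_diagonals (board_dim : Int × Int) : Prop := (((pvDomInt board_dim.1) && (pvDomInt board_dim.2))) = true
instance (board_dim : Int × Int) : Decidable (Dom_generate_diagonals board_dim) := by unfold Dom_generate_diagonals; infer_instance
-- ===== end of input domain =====

-- B replaces A's four families of cell-walking while-loops by one pass over the board that
-- groups the cells into two diagonal dictionaries, then emits them in A's order (objective: alternative).

-- ===== PORT A =====
-- while-loop of the down-right walks: adds (r+1, c+1) while it stays on the board
def walkDR (rows cols r c : Int) (s : List (Int × Int)) : List (Int × Int) :=
  if 0 ≤ r + 1 ∧ r + 1 < rows ∧ 0 ≤ c + 1 ∧ c + 1 < cols then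
    walkDR rows cols (r + 1) (c + 1) (PySem.Set.add s (r + 1, c + 1))
  else s
termination_by (rows - r).toNat
decreasing_by omega

-- while-loop of the down-left walks: adds (r+1, c-1) while it stays on the board
def walkDL (rows cols r c : Int) (s : List (Int × Int)) : List (Int × Int) :=
  if 0 ≤ r + 1 ∧ r + 1 < rows ∧ 0 ≤ c - 1 ∧ c - 1 < cols then
    walkDL rows cols (r + 1) (c - 1) (PySem.Set.add s (r + 1, c - 1))
  else s
termination_by (rows - r).toNat
decreasing_by omega

def generate_diagonals (board_dim : Int × Int) : List (List (Int × Int)) :=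
  let rows := board_dim.1
  let cols := board_dim.2
  let d1 := (PySem.List.pyRange 0 cols 1).foldl (fun acc col =>
    let s := walkDR board_dim.1 board_dim.2 (-1) (col - 1) []
    if 0 < s.length then acc ++ [s] else acc) []
  let d2 := (PySem.List.pyRange 0 rows 1).foldl (fun acc row =>
    let s := walkDR board_dim.1 board_dim.2 row (-1) []
    if 0 < s.length then acc ++ [s] else acc) d1
  let d3 := (PySem.List.pyRange 0 rows 1).foldl (fun acc row =>
    let s := walkDL board_dim.1 board_dim.2 row board_dim.2 []
    if 0 < s.length then acc ++ [s] else acc) d2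
  (PySem.List.pyRange cols 0 (-1)).foldl (fun acc col =>
    let s := walkDL board_dim.1 board_dim.2 (-1) col []
    if 0 < s.length then acc ++ [s] else acc) d3

-- ===== PORT B =====
-- the list comprehension [(r, c) for r in range(rows) for c in range(cols)]
def cellsOf (rows cols : Int) : List (Int × Int) :=
  (PySem.List.pyRange 0 rows 1).flatMap (fun r =>
    (PySem.List.pyRange 0 cols 1).map (fun c => (r, c)))

-- d.setdefault(key p, set()).add(p) over all cells (key p = p.1 - p.2 resp. p.1 + p.2)
def diagDict (key : Int × Int → Int) (cells : List (Int × Int)) :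
    PySem.Dict Int (List (Int × Int)) :=
  cells.foldl (fun d p => d.modify (key p) PySem.Set.empty (fun s => PySem.Set.add s p))
    PySem.Dict.empty

def generate_diagonals_alt (board_dim : Int × Int) : List (List (Int × Int)) :=
  let rows := board_dim.1
  let cols := board_dim.2
  let cells := cellsOf rows cols
  let dr := diagDict (fun p => p.1 - p.2) cells
  let dl := diagDict (fun p => p.1 + p.2) cells
  let d1 := (PySem.List.pyRange 0 cols 1).foldl (fun acc col =>
    let s := dr.getD (-col) PySem.Set.empty
    if 0 < s.length then acc ++ [s] else acc) []
  let d2 := (PySem.List.pyRange 0 rows 1).foldl (fun acc row =>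
    let s := dr.getD (row + 1) PySem.Set.empty
    if 0 < s.length then acc ++ [s] else acc) d1
  let d3 := (PySem.List.pyRange 0 rows 1).foldl (fun acc row =>
    let s := dl.getD (row + cols) PySem.Set.empty
    if 0 < s.length then acc ++ [s] else acc) d2
  (PySem.List.pyRange cols 0 (-1)).foldl (fun acc col =>
    let s := dl.getD (col - 1) PySem.Set.empty
    if 0 < s.length then acc ++ [s] else acc) d3

-- ===== PRECONDITION & SPEC =====
def Spec_generate_diagonals (board_dim : Int × Int) (out : List (List (Int × Int))) : Prop := out = generate_diagonals_alt board_dim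
instance (board_dim : Int × Int) (out : List (List (Int × Int))) : Decidable (Spec_generate_diagonals board_dim out) := by unfold Spec_generate_diagonals; infer_instance

-- ===== CLAIM (what is proved, stated in full; the proofs are below) =====
def Claim_equal_generate_diagonals : Prop := ∀ (board_dim : Int × Int), Dom_generate_diagonals board_dim → Spec_generate_diagonals board_dim (generate_diagonals board_dim)

-- ===== LEMMAS AND PROOFS =====

-- dict-building loop: the value at key k is the sublist of cells on diagonal k, in traversal order
theorem getD_diagDict_aux (key : Int × Int → Int) :
    ∀ (L : List (Int × Int)) (d : PySem.Dict Int (List (Int × Int))) (k : Int),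
      L.Nodup → (∀ p ∈ L, p ∉ d.getD (key p) PySem.Set.empty) →
      (L.foldl (fun d p => d.modify (key p) PySem.Set.empty (fun s => PySem.Set.add s p)) d).getD k PySem.Set.empty
        = d.getD k PySem.Set.empty ++ L.filter (fun p => key p == k) := by
  intro L
  induction L with
  | nil => intro d k _ _; simp
  | cons p L ih =>
    intro d k hnd hmem
    simp only [List.foldl_cons, List.filter_cons]
    have hp : p ∉ d.getD (key p) PySem.Set.empty := hmem p (by simp)
    have hadd : PySem.Set.add (d.getD (key p) PySem.Set.empty) p
        = d.getD (key p) PySem.Set.empty ++ [p] := by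
      simp only [PySem.Set.add, PySem.Set.contains]
      rw [if_neg (by simpa using hp)]
    rw [ih]
    · rw [PySem.Dict.getD_modify, hadd]
      by_cases hk : k = key p
      · simp [hk]
      · have hb : (key p == k) = false := by simp; omega
        simp [hk, hb]
    · exact hnd.of_cons
    · intro q hq
      rw [PySem.Dict.getD_modify]
      by_cases hkq : key q = key p
      · rw [if_pos hkq, hadd]
        simp only [List.mem_append, List.mem_singleton]
        rintro (h | h)
        · exact hmem q (by simp [hq]) (hkq ▸ h)
        · exact (List.nodup_cons.mp hnd).1 (h ▸ hq)
      · rw [if_neg hkq]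
        exact hmem q (by simp [hq])

theorem cells_nodup (rows cols : Int) : (cellsOf rows cols).Nodup := by
  have h : cellsOf rows cols = (PySem.List.pyRange 0 rows 1) ×ˢ (PySem.List.pyRange 0 cols 1) := rfl
  rw [h]
  exact List.Nodup.product (PySem.List.nodup_pyRange_one 0 rows) (PySem.List.nodup_pyRange_one 0 cols)

theorem getD_diagDict (key : Int × Int → Int) (rows cols k : Int) :
    (diagDict key (cellsOf rows cols)).getD k PySem.Set.empty
      = (cellsOf rows cols).filter (fun p => key p == k) := by
  unfold diagDict
  rw [getD_diagDict_aux key _ _ _ (cells_nodup rows cols) (by intro p _; simp [PySem.Dict.getD_empty, PySem.Set.empty])]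
  simp [PySem.Dict.getD_empty]

theorem filter_pyRange_eq (a b v : Int) :
    (PySem.List.pyRange a b 1).filter (fun x => x == v)
      = if a ≤ v ∧ v < b then [v] else [] := by
  by_cases hab : b ≤ a
  · rw [PySem.List.pyRange_one_eq_nil hab, if_neg (by omega)]
    rfl
  · rw [not_le] at hab
    generalize hn : (b - a).toNat = n
    induction n generalizing a with
    | zero => omega
    | succ n ih =>
      rw [PySem.List.pyRange_one_cons hab, List.filter_cons]
      by_cases hv : a = v
      · subst hv
        simp only [BEq.rfl, if_pos]
        rw [if_pos (by omega)]
        have h2 : (PySem.List.pyRange (a+1) b 1).filter (fun x => x == a) = [] := by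
          rw [List.filter_eq_nil_iff]
          intro x hx
          have := PySem.List.mem_pyRange_one.mp hx
          simp; omega
        simp [h2]
      · have hb : (a == v) = false := by simp [hv]
        simp only [hb, Bool.false_eq_true, if_false]
        by_cases h2 : a + 1 < b
        · rw [ih (a+1) (by omega) (by omega)]
          have hiff : (a + 1 ≤ v ∧ v < b) ↔ (a ≤ v ∧ v < b) := by
            constructor <;> (intro h; constructor <;> omega)
          by_cases hc : a ≤ v ∧ v < b
          · rw [if_pos (hiff.mpr hc), if_pos hc]
          · rw [if_neg (fun h => hc (hiff.mp h)), if_neg hc]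
        · rw [PySem.List.pyRange_one_eq_nil (by omega)]
          have hnot : ¬ (a ≤ v ∧ v < b) := by
            rintro ⟨h3, h4⟩; omega
          rw [if_neg hnot]
          rfl

theorem flatMap_pyRange_if {α : Type} (f : Int → α) (P : Int → Prop) [DecidablePred P]
    (lo hi : Int) (hP : ∀ r, P r ↔ lo ≤ r ∧ r < hi) :
    ∀ (n : Nat) (a b : Int), (b - a).toNat ≤ n →
      (PySem.List.pyRange a b 1).flatMap (fun r => if P r then [f r] else [])
        = (PySem.List.pyRange (max a lo) (min b hi) 1).map f := by
  intro n
  induction n with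
  | zero =>
    intro a b h
    rw [PySem.List.pyRange_one_eq_nil (by omega), PySem.List.pyRange_one_eq_nil (by omega)]
    rfl
  | succ n ih =>
    intro a b h
    by_cases hab : b ≤ a
    · rw [PySem.List.pyRange_one_eq_nil hab, PySem.List.pyRange_one_eq_nil (by omega)]
      rfl
    · rw [not_le] at hab
      rw [PySem.List.pyRange_one_cons hab, List.flatMap_cons, ih (a+1) b (by omega)]
      by_cases hPa : P a
      · have ⟨h1, h2⟩ := (hP a).mp hPa
        rw [if_pos hPa]
        have hmax : max a lo = a := by omega
        have hmax2 : max (a+1) lo = a + 1 := by omega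
        rw [hmax, hmax2]
        conv_rhs => rw [PySem.List.pyRange_one_cons (show a < min b hi by omega), List.map_cons]
        rfl
      · rw [if_neg hPa]
        have := (hP a).not.mp hPa
        by_cases hlo : a < lo
        · have hm : max (a+1) lo = max a lo := by omega
          rw [hm]
          rfl
        · have hhi : hi ≤ a := by omega
          rw [PySem.List.pyRange_one_eq_nil (by omega), PySem.List.pyRange_one_eq_nil (by omega)]
          rfl

theorem filter_cells_DR (rows cols k : Int) :
    (cellsOf rows cols).filter (fun p => p.1 - p.2 == k)
      = (PySem.List.pyRange (max 0 k) (min rows (cols + k)) 1).map (fun r => (r, r - k)) := by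
  unfold cellsOf
  rw [List.filter_flatMap]
  have hbody : ∀ r : Int,
      ((PySem.List.pyRange 0 cols 1).map (fun c => (r, c))).filter (fun p => p.1 - p.2 == k)
        = if 0 ≤ r - k ∧ r - k < cols then [((r, r - k) : Int × Int)] else [] := by
    intro r
    rw [List.filter_map]
    have hcong : (PySem.List.pyRange 0 cols 1).filter ((fun (p : Int × Int) => p.1 - p.2 == k) ∘ (fun c => (r, c)))
        = (PySem.List.pyRange 0 cols 1).filter (fun c => c == r - k) := by
      apply List.filter_congr
      intro c _
      simp only [Function.comp_apply]
      by_cases h : c = r - k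
      · subst h; simp
      · have h1 : (c == r - k) = false := by simp [h]
        have h2 : (r - c == k) = false := by simp; omega
        rw [h1, h2]
    rw [hcong, filter_pyRange_eq]
    by_cases h : 0 ≤ r - k ∧ r - k < cols
    · rw [if_pos h, if_pos h]; rfl
    · rw [if_neg h, if_neg h]; rfl
  rw [funext hbody]
  exact flatMap_pyRange_if (fun r => (r, r - k)) (fun r => 0 ≤ r - k ∧ r - k < cols)
    k (cols + k) (by intro r; constructor <;> (intro h; constructor <;> omega))
    (rows - 0).toNat 0 rows le_rfl

theorem filter_cells_DL (rows cols m : Int) :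
    (cellsOf rows cols).filter (fun p => p.1 + p.2 == m)
      = (PySem.List.pyRange (max 0 (m - cols + 1)) (min rows (m + 1)) 1).map (fun r => (r, m - r)) := by
  unfold cellsOf
  rw [List.filter_flatMap]
  have hbody : ∀ r : Int,
      ((PySem.List.pyRange 0 cols 1).map (fun c => (r, c))).filter (fun p => p.1 + p.2 == m)
        = if 0 ≤ m - r ∧ m - r < cols then [((r, m - r) : Int × Int)] else [] := by
    intro r
    rw [List.filter_map]
    have hcong : (PySem.List.pyRange 0 cols 1).filter ((fun (p : Int × Int) => p.1 + p.2 == m) ∘ (fun c => (r, c)))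
        = (PySem.List.pyRange 0 cols 1).filter (fun c => c == m - r) := by
      apply List.filter_congr
      intro c _
      simp only [Function.comp_apply]
      by_cases h : c = m - r
      · subst h; simp
      · have h1 : (c == m - r) = false := by simp [h]
        have h2 : (r + c == m) = false := by simp; omega
        rw [h1, h2]
    rw [hcong, filter_pyRange_eq]
    by_cases h : 0 ≤ m - r ∧ m - r < cols
    · rw [if_pos h, if_pos h]; rfl
    · rw [if_neg h, if_neg h]; rfl
  rw [funext hbody]
  exact flatMap_pyRange_if (fun r => (r, m - r)) (fun r => 0 ≤ m - r ∧ m - r < cols)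
    (m - cols + 1) (m + 1) (by intro r; constructor <;> (intro h; constructor <;> omega))
    (rows - 0).toNat 0 rows le_rfl

theorem walkDR_eq : ∀ (n : Nat) (rows cols r c : Int) (s : List (Int × Int)),
    (min rows (cols + (r - c)) - (r + 1)).toNat ≤ n → 0 ≤ r + 1 → 0 ≤ c + 1 →
    (∀ p ∈ s, p.1 ≤ r) →
    walkDR rows cols r c s
      = s ++ (PySem.List.pyRange (r + 1) (min rows (cols + (r - c))) 1).map
          (fun x => (x, x - (r - c))) := by
  intro n
  induction n with
  | zero =>
    intro rows cols r c s h h1 h2 h3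
    rw [walkDR, if_neg (by omega), PySem.List.pyRange_one_eq_nil (by omega)]
    simp
  | succ n ih =>
    intro rows cols r c s h h1 h2 h3
    by_cases hc : 0 ≤ r + 1 ∧ r + 1 < rows ∧ 0 ≤ c + 1 ∧ c + 1 < cols
    · rw [walkDR, if_pos hc]
      have hadd : PySem.Set.add s (r + 1, c + 1) = s ++ [(r + 1, c + 1)] := by
        simp only [PySem.Set.add, PySem.Set.contains]
        rw [if_neg (by
          simp only [List.contains_iff_mem]
          intro hmem
          have := h3 _ hmem
          simp at this)]
      rw [hadd]
      rw [ih rows cols (r+1) (c+1) _ (by omega) (by omega) (by omega)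
        (by intro p hp; rcases List.mem_append.mp hp with h' | h'
            · exact le_trans (h3 p h') (by omega)
            · simp at h'; simp [h'])]
      have hkey : (r + 1) - (c + 1) = r - c := by omega
      rw [hkey, List.append_assoc]
      congr 1
      conv_rhs => rw [PySem.List.pyRange_one_cons (show r + 1 < min rows (cols + (r - c)) by omega), List.map_cons]
      have hc2 : c + 1 = r + 1 - (r - c) := by omega
      rw [hc2]
      rfl
    · rw [walkDR, if_neg hc, PySem.List.pyRange_one_eq_nil (by omega)]
      simp

theorem walkDL_eq : ∀ (n : Nat) (rows cols r c : Int) (s : List (Int × Int)),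
    (min rows (r + c + 1) - (r + 1)).toNat ≤ n → 0 ≤ r + 1 → c ≤ cols →
    (∀ p ∈ s, p.1 ≤ r) →
    walkDL rows cols r c s
      = s ++ (PySem.List.pyRange (r + 1) (min rows (r + c + 1)) 1).map
          (fun x => (x, r + c - x)) := by
  intro n
  induction n with
  | zero =>
    intro rows cols r c s h h1 h2 h3
    rw [walkDL, if_neg (by omega), PySem.List.pyRange_one_eq_nil (by omega)]
    simp
  | succ n ih =>
    intro rows cols r c s h h1 h2 h3
    by_cases hc : 0 ≤ r + 1 ∧ r + 1 < rows ∧ 0 ≤ c - 1 ∧ c - 1 < cols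
    · rw [walkDL, if_pos hc]
      have hadd : PySem.Set.add s (r + 1, c - 1) = s ++ [(r + 1, c - 1)] := by
        simp only [PySem.Set.add, PySem.Set.contains]
        rw [if_neg (by
          simp only [List.contains_iff_mem]
          intro hmem
          have := h3 _ hmem
          simp at this)]
      rw [hadd]
      rw [ih rows cols (r+1) (c-1) _ (by omega) (by omega) (by omega)
        (by intro p hp; rcases List.mem_append.mp hp with h' | h'
            · exact le_trans (h3 p h') (by omega)
            · simp at h'; simp [h'])]
      have hkey : (r + 1) + (c - 1) = r + c := by omega
      rw [hkey, List.append_assoc]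
      congr 1
      conv_rhs => rw [PySem.List.pyRange_one_cons (show r + 1 < min rows (r + c + 1) by omega), List.map_cons]
      have hc2 : c - 1 = r + c - (r + 1) := by omega
      rw [hc2]
      rfl
    · rw [walkDL, if_neg hc, PySem.List.pyRange_one_eq_nil (by omega)]
      simp

-- both sides' emission loops have the same shape: congruence in the per-index diagonal
theorem fold_phase_congr {g h : Int → List (Int × Int)} (l : List Int)
    (acc1 acc2 : List (List (Int × Int))) (hinit : acc1 = acc2)
    (hgh : ∀ x ∈ l, g x = h x) :
    l.foldl (fun acc x => if 0 < (g x).length then acc ++ [g x] else acc) acc1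
      = l.foldl (fun acc x => if 0 < (h x).length then acc ++ [h x] else acc) acc2 := by
  subst hinit
  apply List.foldl_ext
  intro acc x hx
  rw [hgh x hx]

theorem phase1_eq (rows cols col : Int) (h0 : 0 ≤ col) (h1 : col < cols) :
    walkDR rows cols (-1) (col - 1) []
      = (diagDict (fun p => p.1 - p.2) (cellsOf rows cols)).getD (-col) PySem.Set.empty := by
  rw [getD_diagDict, filter_cells_DR]
  rw [walkDR_eq ((min rows (cols + ((-1) - (col - 1))) - ((-1) + 1)).toNat) rows cols (-1) (col - 1) []
    le_rfl (by omega) (by omega) (by simp)]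
  have e1 : (-1 : Int) - (col - 1) = -col := by omega
  have e2 : ((-1 : Int) + 1) = 0 := by omega
  have e3 : max 0 (-col) = 0 := by omega
  rw [e1, e2, e3]
  simp

theorem phase2_eq (rows cols row : Int) (h0 : 0 ≤ row) (h1 : row < rows) :
    walkDR rows cols row (-1) []
      = (diagDict (fun p => p.1 - p.2) (cellsOf rows cols)).getD (row + 1) PySem.Set.empty := by
  rw [getD_diagDict, filter_cells_DR]
  rw [walkDR_eq ((min rows (cols + (row - (-1))) - (row + 1)).toNat) rows cols row (-1) []
    le_rfl (by omega) (by omega) (by simp)]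
  have e1 : row - (-1 : Int) = row + 1 := by omega
  have e2 : max 0 (row + 1) = row + 1 := by omega
  rw [e1, e2]
  simp

theorem phase3_eq (rows cols row : Int) (h0 : 0 ≤ row) (h1 : row < rows) :
    walkDL rows cols row cols []
      = (diagDict (fun p => p.1 + p.2) (cellsOf rows cols)).getD (row + cols) PySem.Set.empty := by
  rw [getD_diagDict, filter_cells_DL]
  rw [walkDL_eq ((min rows (row + cols + 1) - (row + 1)).toNat) rows cols row cols []
    le_rfl (by omega) le_rfl (by simp)]
  have e1 : max 0 (row + cols - cols + 1) = row + 1 := by omega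
  rw [e1]
  simp

theorem phase4_eq (rows cols col : Int) (h0 : 0 < col) (h1 : col ≤ cols) :
    walkDL rows cols (-1) col []
      = (diagDict (fun p => p.1 + p.2) (cellsOf rows cols)).getD (col - 1) PySem.Set.empty := by
  rw [getD_diagDict, filter_cells_DL]
  rw [walkDL_eq ((min rows ((-1) + col + 1) - ((-1) + 1)).toNat) rows cols (-1) col []
    le_rfl (by omega) h1 (by simp)]
  have e1 : (-1 : Int) + col + 1 = col - 1 + 1 := by omega
  have e2 : ((-1 : Int) + 1) = 0 := by omega
  have e3 : max 0 (col - 1 - cols + 1) = 0 := by omega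
  rw [e1, e2, e3]
  simp only [List.nil_append]
  apply List.map_congr_left
  intro x _
  have : (-1 : Int) + col - x = col - 1 - x := by omega
  rw [this]

theorem gen_eq (rows cols : Int) :
    generate_diagonals (rows, cols) = generate_diagonals_alt (rows, cols) := by
  simp only [generate_diagonals, generate_diagonals_alt]
  apply fold_phase_congr
  · apply fold_phase_congr
    · apply fold_phase_congr
      · apply fold_phase_congr
        · rfl
        · intro col hcol
          have := PySem.List.mem_pyRange_one.mp hcol
          exact phase1_eq rows cols col this.1 this.2
      · intro row hrow
        have := PySem.List.mem_pyRange_one.mp hrow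
        exact phase2_eq rows cols row this.1 this.2
    · intro row hrow
      have := PySem.List.mem_pyRange_one.mp hrow
      exact phase3_eq rows cols row this.1 this.2
  · intro col hcol
    have := PySem.List.mem_pyRange_neg_one.mp hcol
    exact phase4_eq rows cols col this.1 this.2

-- ===== VERDICT (by name: the statement is the Claim_ definition above) =====
theorem generate_diagonals_spec : Claim_equal_generate_diagonals := by
  intro board_dim _
  unfold Spec_generate_diagonals
  obtain ⟨rows, cols⟩ := board_dim
  exact gen_eq rows cols
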